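-- pv_equiv track=rewrite | github.com/NobylPistachio/MathMastery | preAlgebra/U1_L3_PrimeFactorization.py | commonList
-- ===== SOURCE A (Python) =====
-- def commonList(a:list,b:list) -> list:
--     common = a
--     #need to count the occurances in the list of factors
--     for num in b:
--         if b.count(num) > common.count(num):
--             difference = b.count(num) - common.count(num)
--             for repeat in range(difference):
--                 common.append(num)
--     return sorted(common)
-- ===== SOURCE B (Python) =====
-- def commonList(a: list, b: list) -> list:
--     # Different algorithm: sort both lists, run-length-encode each (runs built
--     # back-to-front), then two-pointer merge of the run lists taking the max run
--     # length per value; the output is produced already sorted, with no counting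
--     # of the unsorted lists and no final sort.
--     # Note: A mutates its argument a in place; B does not — the equivalence
--     # claimed is about the return value.
--     def runs(s):
--         r = []
--         for x in reversed(s):
--             if r and r[0][0] == x:
--                 r[0] = (x, r[0][1] + 1)
--             else:
--                 r.insert(0, (x, 1))
--         return r
--     ra, rb = runs(sorted(a)), runs(sorted(b))
--     out = []
--     i = j = 0
--     while i < len(ra) and j < len(rb):
--         if ra[i][0] < rb[j][0]:
--             v, c = ra[i]; i += 1
--         elif rb[j][0] < ra[i][0]:
--             v, c = rb[j]; j += 1
--         else:
--             v, c1 = ra[i]; c2 = rb[j][1]; c = max(c1, c2); i += 1; j += 1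
--         out.extend([v] * c)
--     for v, c in ra[i:] + rb[j:]:
--         out.extend([v] * c)
--     return out
-- ===== Notes on version B (the rewrite author's own statement) =====
-- stated objective: faster
-- what changed: Replaces A's quadratic count-and-top-up pass plus final sort by sorting both lists up front, run-length-encoding each, and two-pointer merging the run lists taking the max run length per value, emitting the result already in sorted order; A mutates its argument a in place, B does not (return values agree).
import Mathlib
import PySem

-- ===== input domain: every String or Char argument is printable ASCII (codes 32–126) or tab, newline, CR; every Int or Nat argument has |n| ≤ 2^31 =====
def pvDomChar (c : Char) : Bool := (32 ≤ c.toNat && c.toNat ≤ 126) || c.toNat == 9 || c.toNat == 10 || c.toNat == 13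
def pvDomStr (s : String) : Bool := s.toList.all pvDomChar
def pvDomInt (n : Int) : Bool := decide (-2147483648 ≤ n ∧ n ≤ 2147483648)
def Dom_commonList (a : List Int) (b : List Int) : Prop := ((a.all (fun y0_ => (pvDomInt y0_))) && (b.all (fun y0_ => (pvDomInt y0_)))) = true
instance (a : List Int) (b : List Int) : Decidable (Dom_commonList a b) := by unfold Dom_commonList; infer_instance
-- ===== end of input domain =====

-- B sorts both lists, run-length-encodes each, and merges the run lists taking the
-- max run length per value, emitting the result already sorted (faster); A mutates
-- its argument a in place and B does not — the equivalence proved is about the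
-- return value.

-- ===== PORT A =====
def commonList (a : List Int) (b : List Int) : List Int :=
  let common :=
    b.foldl (fun common num =>
      if PySem.List.count b num > PySem.List.count common num then
        -- difference = b.count(num) - common.count(num); for repeat in range(difference): common.append(num)
        (PySem.List.pyRange 0 ((PySem.List.count b num : Int) - (PySem.List.count common num : Int)) 1).foldl
          (fun common _ => common ++ [num]) common
      else common) a
  PySem.List.sorted common (fun x => x)

-- ===== PORT B =====
-- runs(s): iterate reversed(s), consing a new run at the front or bumping the front run
def pvRuns (s : List Int) : List (Int × Nat) :=
  s.foldr (fun x r =>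
    match r with
    | (v, c) :: t => if v = x then (x, c + 1) :: t else (x, 1) :: (v, c) :: t
    | [] => [(x, 1)]) []

-- the two-pointer while loop over the run lists (index pointers become list heads)
def pvMerge : List (Int × Nat) → List (Int × Nat) → List Int
  | [], rb => rb.flatMap (fun p => List.replicate p.2 p.1)
  | p :: ra, [] => (p :: ra).flatMap (fun q => List.replicate q.2 q.1)
  | (v1, c1) :: ra, (v2, c2) :: rb =>
      if v1 < v2 then List.replicate c1 v1 ++ pvMerge ra ((v2, c2) :: rb)
      else if v2 < v1 then List.replicate c2 v2 ++ pvMerge ((v1, c1) :: ra) rb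
      else List.replicate (max c1 c2) v1 ++ pvMerge ra rb

def commonList_alt (a : List Int) (b : List Int) : List Int :=
  pvMerge (pvRuns (PySem.List.sorted a (fun x => x))) (pvRuns (PySem.List.sorted b (fun x => x)))

-- ===== PRECONDITION & SPEC =====
def Spec_commonList (a : List Int) (b : List Int) (out : List Int) : Prop := out = commonList_alt a b
instance (a : List Int) (b : List Int) (out : List Int) : Decidable (Spec_commonList a b out) := by unfold Spec_commonList; infer_instance

-- ===== CLAIM (what is proved, stated in full; the proofs are below) =====
def Claim_equal_commonList : Prop := ∀ (a : List Int) (b : List Int), Dom_commonList a b → Spec_commonList a b (commonList a b)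

-- ===== LEMMAS AND PROOFS =====

def pvExp (r : List (Int × Nat)) : List Int := r.flatMap (fun p => List.replicate p.2 p.1)

theorem pvRuns_cons (x : Int) (xs : List Int) :
    pvRuns (x :: xs) = (match pvRuns xs with
      | (v, c) :: t => if v = x then (x, c + 1) :: t else (x, 1) :: (v, c) :: t
      | [] => [(x, 1)]) := rfl

theorem pvExp_runs (s : List Int) : pvExp (pvRuns s) = s := by
  induction s with
  | nil => rfl
  | cons x xs ih =>
    rw [pvRuns_cons]
    rcases h : pvRuns xs with _ | ⟨⟨v, c⟩, t⟩
    · rw [h] at ih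
      simp only [pvExp, List.flatMap_nil] at ih
      simp [pvExp, ← ih]
    · rw [h] at ih
      by_cases hvx : v = x
      · subst hvx
        simp only [pvExp, List.flatMap_cons] at *
        simp [← ih, List.replicate_succ]
      · simp only [if_neg hvx, pvExp, List.flatMap_cons] at *
        simp [ih]

theorem pvRuns_head (x : Int) (xs : List Int) :
    ∃ c t, pvRuns (x :: xs) = (x, c) :: t := by
  rw [pvRuns_cons]
  rcases pvRuns xs with _ | ⟨⟨v, c⟩, t⟩
  · exact ⟨1, [], rfl⟩
  · by_cases hvx : v = x
    · subst hvx; exact ⟨c + 1, t, by simp⟩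
    · exact ⟨1, (v, c) :: t, by simp [hvx]⟩

theorem pvRuns_keys_lt (s : List Int) (hs : s.Pairwise (· ≤ ·)) :
    ((pvRuns s).map Prod.fst).Pairwise (· < ·) := by
  induction s with
  | nil => simp [pvRuns]
  | cons x xs ih =>
    rcases List.pairwise_cons.mp hs with ⟨hx, hxs⟩
    have ih' := ih hxs
    rw [pvRuns_cons]
    rcases hr : pvRuns xs with _ | ⟨⟨v, c⟩, t⟩
    · simp
    · rw [hr] at ih'
      by_cases hvx : v = x
      · subst hvx
        simpa using ih'
      · simp only [if_neg hvx, List.map_cons, List.pairwise_cons]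
        have hxsne : xs ≠ [] := by
          intro h; rw [h] at hr; simp [pvRuns] at hr
        rcases List.exists_cons_of_ne_nil hxsne with ⟨y, ys, rfl⟩
        rcases pvRuns_head y ys with ⟨c', t', heq⟩
        rw [heq] at hr
        injection hr with h1 _
        injection h1 with h3 _
        subst h3
        have hxv : x < y := lt_of_le_of_ne (hx y List.mem_cons_self) (fun h => hvx h.symm)
        have ih2 := List.pairwise_cons.mp ih'
        refine ⟨?_, ih2.1, ih2.2⟩
        intro k hk
        rcases List.mem_cons.mp hk with rfl | hk'
        · exact hxv
        · exact lt_trans hxv (ih2.1 k hk')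

theorem mem_pvExp {y : Int} {r : List (Int × Nat)} (h : y ∈ pvExp r) :
    y ∈ r.map Prod.fst := by
  rcases List.mem_flatMap.mp h with ⟨p, hp, hy⟩
  have := List.eq_of_mem_replicate hy
  exact List.mem_map.mpr ⟨p, hp, this.symm⟩

theorem count_pvExp_cons (v : Int) (c : Nat) (r : List (Int × Nat)) (y : Int) :
    (pvExp ((v, c) :: r)).count y = (if y = v then c else 0) + (pvExp r).count y := by
  simp only [pvExp, List.flatMap_cons, List.count_append, List.count_replicate]
  rcases eq_or_ne y v with rfl | h
  · simp
  · have h' : (v == y) = false := by simp [Ne.symm h]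
    simp [h, h']

theorem count_pvExp_zero {y : Int} {r : List (Int × Nat)}
    (h : ∀ k ∈ r.map Prod.fst, y ≠ k) : (pvExp r).count y = 0 := by
  rw [List.count_eq_zero]
  intro hy
  exact h y (mem_pvExp hy) rfl

theorem keys_head_lt {v : Int} {c : Nat} {r : List (Int × Nat)}
    (h : (((v, c) :: r).map Prod.fst).Pairwise (· < ·)) :
    ∀ k ∈ r.map Prod.fst, v < k := by
  rw [List.map_cons] at h
  exact (List.pairwise_cons.mp h).1

theorem keys_tail_lt {v : Int} {c : Nat} {r : List (Int × Nat)}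
    (h : (((v, c) :: r).map Prod.fst).Pairwise (· < ·)) :
    (r.map Prod.fst).Pairwise (· < ·) := by
  rw [List.map_cons] at h
  exact (List.pairwise_cons.mp h).2

theorem pvExp_count_lt {v : Int} {r : List (Int × Nat)}
    (h : ∀ k ∈ r.map Prod.fst, v < k) {y : Int} (hy : y ≤ v) : (pvExp r).count y = 0 :=
  count_pvExp_zero (fun k hk => ne_of_lt (lt_of_le_of_lt hy (h k hk)))

theorem mem_pvMerge : ∀ (ra rb : List (Int × Nat)) (y : Int), y ∈ pvMerge ra rb →
    y ∈ ra.map Prod.fst ∨ y ∈ rb.map Prod.fst := by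
  intro ra rb
  fun_induction pvMerge ra rb with
  | case1 rb => intro y h; exact Or.inr (mem_pvExp h)
  | case2 p ra => intro y h; exact Or.inl (mem_pvExp h)
  | case3 v1 c1 ra v2 c2 rb h1 ih =>
    intro y h
    rcases List.mem_append.mp h with h | h
    · exact Or.inl (by simp [List.eq_of_mem_replicate h])
    · rcases ih y h with h | h
      · exact Or.inl (List.mem_cons_of_mem _ h)
      · exact Or.inr h
  | case4 v1 c1 ra v2 c2 rb h1 h2 ih =>
    intro y h
    rcases List.mem_append.mp h with h | h
    · exact Or.inr (by simp [List.eq_of_mem_replicate h])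
    · rcases ih y h with h | h
      · exact Or.inl h
      · exact Or.inr (List.mem_cons_of_mem _ h)
  | case5 v1 c1 ra v2 c2 rb h1 h2 ih =>
    intro y h
    rcases List.mem_append.mp h with h | h
    · exact Or.inl (by simp [List.eq_of_mem_replicate h])
    · rcases ih y h with h | h
      · exact Or.inl (List.mem_cons_of_mem _ h)
      · exact Or.inr (List.mem_cons_of_mem _ h)

theorem pvMerge_count : ∀ (ra rb : List (Int × Nat)),
    ((ra.map Prod.fst).Pairwise (· < ·)) → ((rb.map Prod.fst).Pairwise (· < ·)) →
    ∀ y, (pvMerge ra rb).count y = max ((pvExp ra).count y) ((pvExp rb).count y) := by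
  intro ra rb
  fun_induction pvMerge ra rb with
  | case1 rb => intro _ _ y; simp [pvExp]
  | case2 p ra => intro _ _ y; simp [pvExp]
  | case3 v1 c1 ra v2 c2 rb hlt ih =>
    intro ha hb y
    have hA := keys_head_lt ha
    have hB := keys_head_lt hb
    simp only [List.count_append, List.count_replicate, ih (keys_tail_lt ha) hb,
      count_pvExp_cons, beq_iff_eq]
    rcases eq_or_ne y v1 with rfl | h1
    · rw [pvExp_count_lt hA le_rfl, pvExp_count_lt hB (le_of_lt hlt)]
      simp only [if_true, if_neg (ne_of_lt hlt)]
      omega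
    · simp only [if_neg h1, if_neg (show ¬ v1 = y from fun e => h1 e.symm)]
      omega
  | case4 v1 c1 ra v2 c2 rb h1 hlt ih =>
    intro ha hb y
    have hA := keys_head_lt ha
    have hB := keys_head_lt hb
    simp only [List.count_append, List.count_replicate, ih ha (keys_tail_lt hb),
      count_pvExp_cons, beq_iff_eq]
    rcases eq_or_ne y v2 with rfl | h2
    · rw [pvExp_count_lt hB le_rfl, pvExp_count_lt hA (le_of_lt hlt)]
      simp only [if_true, if_neg (ne_of_lt hlt)]
      omega
    · simp only [if_neg h2, if_neg (show ¬ v2 = y from fun e => h2 e.symm)]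
      omega
  | case5 v1 c1 ra v2 c2 rb h1 h2 ih =>
    intro ha hb y
    have heq : v1 = v2 := le_antisymm (not_lt.mp h2) (not_lt.mp h1)
    subst heq
    have hA := keys_head_lt ha
    have hB := keys_head_lt hb
    simp only [List.count_append, List.count_replicate,
      ih (keys_tail_lt ha) (keys_tail_lt hb), count_pvExp_cons, beq_iff_eq]
    rcases eq_or_ne y v1 with rfl | hy
    · rw [pvExp_count_lt hA le_rfl, pvExp_count_lt hB le_rfl]
      simp only [if_true]
      omega
    · simp only [if_neg hy, if_neg (show ¬ v1 = y from fun e => hy e.symm)]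
      omega

theorem keys_lb {v : Int} {c : Nat} {r : List (Int × Nat)}
    (h : (((v, c) :: r).map Prod.fst).Pairwise (· < ·)) :
    ∀ k ∈ ((v, c) :: r).map Prod.fst, v ≤ k := by
  intro k hk
  rcases List.mem_cons.mp hk with rfl | hk'
  · exact le_rfl
  · exact le_of_lt (keys_head_lt h k hk')

theorem pvExp_sorted : ∀ (r : List (Int × Nat)),
    ((r.map Prod.fst).Pairwise (· < ·)) → (pvExp r).Pairwise (· ≤ ·) := by
  intro r
  induction r with
  | nil => intro _; simp [pvExp]
  | cons p r ih =>
    rcases p with ⟨v, c⟩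
    intro h
    simp only [pvExp, List.flatMap_cons]
    rw [List.pairwise_append]
    refine ⟨?_, ih (keys_tail_lt h), ?_⟩
    · apply List.pairwise_replicate.mpr
      simp
    · intro x hx y hy
      rw [List.eq_of_mem_replicate hx]
      exact le_of_lt (keys_head_lt h y (mem_pvExp hy))

theorem pvMerge_sorted : ∀ (ra rb : List (Int × Nat)),
    ((ra.map Prod.fst).Pairwise (· < ·)) → ((rb.map Prod.fst).Pairwise (· < ·)) →
    (pvMerge ra rb).Pairwise (· ≤ ·) := by
  intro ra rb
  fun_induction pvMerge ra rb with
  | case1 rb => intro _ hb; exact pvExp_sorted rb hb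
  | case2 p ra => intro ha _; exact pvExp_sorted _ ha
  | case3 v1 c1 ra v2 c2 rb hlt ih =>
    intro ha hb
    rw [List.pairwise_append]
    refine ⟨List.pairwise_replicate.mpr (by simp), ih (keys_tail_lt ha) hb, ?_⟩
    intro x hx y hy
    rw [List.eq_of_mem_replicate hx]
    rcases mem_pvMerge _ _ y hy with h | h
    · exact le_of_lt (keys_head_lt ha y h)
    · exact le_trans (le_of_lt hlt) (keys_lb hb y h)
  | case4 v1 c1 ra v2 c2 rb h1 hlt ih =>
    intro ha hb
    rw [List.pairwise_append]
    refine ⟨List.pairwise_replicate.mpr (by simp), ih ha (keys_tail_lt hb), ?_⟩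
    intro x hx y hy
    rw [List.eq_of_mem_replicate hx]
    rcases mem_pvMerge _ _ y hy with h | h
    · exact le_trans (le_of_lt hlt) (keys_lb ha y h)
    · exact le_of_lt (keys_head_lt hb y h)
  | case5 v1 c1 ra v2 c2 rb h1 h2 ih =>
    intro ha hb
    have heq : v1 = v2 := le_antisymm (not_lt.mp h2) (not_lt.mp h1)
    subst heq
    rw [List.pairwise_append]
    refine ⟨List.pairwise_replicate.mpr (by simp), ih (keys_tail_lt ha) (keys_tail_lt hb), ?_⟩
    intro x hx y hy
    rw [List.eq_of_mem_replicate hx]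
    rcases mem_pvMerge _ _ y hy with h | h
    · exact le_of_lt (keys_head_lt ha y h)
    · exact le_of_lt (keys_head_lt hb y h)

-- count of A's loop result: each element of b is topped up to its count in b once
theorem pvAfold_count (b : List Int) (l : List Int) : ∀ (c : List Int) (y : Int),
    (l.foldl (fun common num =>
        if PySem.List.count b num > PySem.List.count common num then
          common ++ List.replicate ((PySem.List.count b num : Int) - (PySem.List.count common num : Int)).toNat num
        else common) c).count y
      = if y ∈ l then max (List.count y b) (List.count y c) else List.count y c := by
  induction l with
  | nil => intro c y; simp
  | cons num rest ih =>
    intro c y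
    simp only [List.foldl_cons]
    rw [ih]
    have hcc' : List.count y (if PySem.List.count b num > PySem.List.count c num then
          c ++ List.replicate ((PySem.List.count b num : Int) - (PySem.List.count c num : Int)).toNat num
        else c)
        = if y = num then max (List.count y b) (List.count y c) else List.count y c := by
      simp only [PySem.List.count_eq]
      by_cases hyn : y = num
      · subst hyn
        rw [if_pos rfl]
        split_ifs with h1
        · simp [List.count_append]
          omega
        · omega
      · rw [if_neg hyn]
        have hny : ¬ num = y := fun c => hyn c.symm
        split_ifs with h1
        · simp [List.count_append, List.count_replicate, hny]
        · rfl
    rw [hcc']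
    by_cases hm : y ∈ rest
    · simp only [hm, if_true, List.mem_cons, or_true]
      split_ifs <;> omega
    · simp only [hm, if_false, List.mem_cons, or_false]

-- inner append loop of A: appending num n.toNat times
theorem pvRepeat_fold (r : List Int) (num : Int) : ∀ c : List Int,
    r.foldl (fun common _ => common ++ [num]) c = c ++ List.replicate r.length num := by
  induction r with
  | nil => simp
  | cons _ rs ih =>
    intro c
    simp only [List.foldl_cons, ih (c ++ [num]), List.length_cons, List.replicate_succ,
      List.append_assoc, List.singleton_append]

theorem commonList_spec' : ∀ (a b : List Int), commonList a b = commonList_alt a b := by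
  intro a b
  rw [commonList, commonList_alt]
  -- A side: replace the inner pyRange fold by an append of replicates
  have hA : b.foldl (fun common num =>
        if PySem.List.count b num > PySem.List.count common num then
          (PySem.List.pyRange 0 ((PySem.List.count b num : Int) - (PySem.List.count common num : Int)) 1).foldl
            (fun common _ => common ++ [num]) common
        else common) a
      = b.foldl (fun common num =>
        if PySem.List.count b num > PySem.List.count common num then
          common ++ List.replicate ((PySem.List.count b num : Int) - (PySem.List.count common num : Int)).toNat num
        else common) a := by
    refine PySem.List.foldl_congr_mem _ _ _ _ ?_
    intro acc num _
    split_ifs with h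
    · rw [pvRepeat_fold]
      rw [PySem.List.length_pyRange_one]
      simp
    · rfl
  rw [hA]
  have hka := pvRuns_keys_lt _ (PySem.List.sorted_pairwise a (fun x : Int => x))
  have hkb := pvRuns_keys_lt _ (PySem.List.sorted_pairwise b (fun x : Int => x))
  refine PySem.List.sorted_id_eq_of_perm_of_pairwise _ _ ?_ ?_
  · refine List.perm_iff_count.mpr fun y => ?_
    rw [pvMerge_count _ _ hka hkb, pvExp_runs, pvExp_runs,
      ((PySem.List.sorted_perm a (fun x => x) false).count_eq y),
      ((PySem.List.sorted_perm b (fun x => x) false).count_eq y),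
      pvAfold_count]
    by_cases hy : y ∈ b
    · simp only [hy, if_true]
      omega
    · have : List.count y b = 0 := List.count_eq_zero.mpr hy
      simp only [hy, if_false]
      omega
  · exact pvMerge_sorted _ _ hka hkb

-- ===== VERDICT (by name: the statement is the Claim_ definition above) =====
theorem commonList_spec : Claim_equal_commonList := by
  intro a b _
  show commonList a b = commonList_alt a b
  exact commonList_spec' a b
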